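-- pv_equiv track=rewrite | github.com/Handbandlisot/Practicume | Practicum12/6.py | degree5
-- ===== SOURCE A (Python) =====
-- def degree5(n):
--     '''
--     Function calculates what power of 5 the natural number n is
--     '''
--     if n == 1:
--         return 0
--     elif n % 5 != 0:
--         return -1
--     elif degree5(n // 5) == -1:
--         return -1
--     else:
--         return 1 + degree5(n // 5)
-- ===== SOURCE B (Python) =====
-- def degree5(n):
--     '''
--     Function calculates what power of 5 the natural number n is
--     '''
--     p, k = 1, 0
--     while p < n:
--         p *= 5
--         k += 1
--     return k if p == n else -1
-- ===== Notes on version B (the rewrite author's own statement) =====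
-- stated objective: alternative
-- what changed: B multiplies powers of 5 upward (p = 1, 5, 25, ... until p >= n) and compares, instead of A's divide-down recursion with modulus tests and a double recursive call; B uses no division or modulus and is total.
-- outside the precondition, e.g. on degree5(0): A raises RecursionError, B returns -1
import Mathlib
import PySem

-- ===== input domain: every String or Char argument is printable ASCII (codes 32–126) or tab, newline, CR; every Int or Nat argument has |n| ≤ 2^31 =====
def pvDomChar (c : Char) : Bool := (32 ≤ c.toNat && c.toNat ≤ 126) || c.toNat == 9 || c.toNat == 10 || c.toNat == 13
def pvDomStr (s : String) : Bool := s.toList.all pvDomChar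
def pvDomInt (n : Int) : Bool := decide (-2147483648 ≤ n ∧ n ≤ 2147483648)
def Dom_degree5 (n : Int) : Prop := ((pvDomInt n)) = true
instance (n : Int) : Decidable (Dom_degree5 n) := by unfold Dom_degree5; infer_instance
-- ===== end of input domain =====

-- B replaces A's divide-down recursion (modulus tests, double recursive call) by an upward
-- multiply-and-compare loop with no division at all; objective: alternative algorithm.

-- termination measure lemma for port A's recursion
theorem pvDec5 (n : Int) (hm : PySem.Int.mod n 5 = 0) (h0 : n ≠ 0) :
    (PySem.Int.floordiv n 5).natAbs < n.natAbs := by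
  rw [PySem.Int.floordiv_eq_ediv_of_pos (by norm_num)]
  obtain ⟨k, hk⟩ := (PySem.Int.mod_eq_zero_iff_dvd n 5).mp hm
  subst hk
  rw [Int.mul_ediv_cancel_left _ (by norm_num)]
  have h5 : (5 : Int).natAbs = 5 := rfl
  rw [Int.natAbs_mul, h5]
  have hk : k ≠ 0 := by rintro rfl; simp at h0
  have : k.natAbs ≠ 0 := Int.natAbs_ne_zero.mpr hk
  omega

-- ===== PORT A =====
def degree5 (n : Int) : Int :=
  if n = 1 then 0
  else if PySem.Int.mod n 5 ≠ 0 then -1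
  -- totality guard only: at n = 0 Python's recursion never terminates (RecursionError); excluded by Pre_
  else if _h0 : n = 0 then -1
  else if degree5 (PySem.Int.floordiv n 5) = -1 then -1
  else 1 + degree5 (PySem.Int.floordiv n 5)
termination_by n.natAbs
decreasing_by all_goals exact pvDec5 n (by omega) _h0

-- ===== PORT B =====
-- the 'while p < n' loop of Source B; hp is a proof-only invariant used for termination
def degree5Up (n p k : Int) (hp : 1 ≤ p) : Int :=
  if h : p < n then degree5Up n (p * 5) (k + 1) (by linarith)
  else if p = n then k else -1
termination_by (n - p).toNat
decreasing_by omega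

def degree5_alt (n : Int) : Int := degree5Up n 1 0 (by norm_num)

-- ===== PRECONDITION & SPEC =====
-- Pre_ excludes only n = 0, on which A never returns (infinite recursion, RecursionError).
def Pre_degree5 (n : Int) : Prop := n ≠ 0
instance (n : Int) : Decidable (Pre_degree5 n) := by unfold Pre_degree5; infer_instance
def pvWitness_degree5 : Int := (5)
def Spec_degree5 (n : Int) (out : Int) : Prop := out = degree5_alt n
instance (n : Int) (out : Int) : Decidable (Spec_degree5 n out) := by unfold Spec_degree5; infer_instance

-- ===== CLAIM (what is proved, stated in full; the proofs are below) =====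
def Claim_equal_degree5 : Prop := ∀ (n : Int), Dom_degree5 n → Pre_degree5 n → Spec_degree5 n (degree5 n)

-- ===== LEMMAS AND PROOFS =====

-- A on an exact power: degree5 (5^k) = k
theorem degree5_pow (k : ℕ) : degree5 (5 ^ k) = k := by
  induction k with
  | zero => simp [degree5]
  | succ k ih =>
    rw [degree5]
    have h5 : (5 : Int) ^ (k + 1) = 5 * 5 ^ k := by ring
    have hpos : (0 : Int) < 5 ^ k := by positivity
    have h1 : (5 : Int) ^ (k + 1) ≠ 1 := by rw [h5]; nlinarith
    have h0 : (5 : Int) ^ (k + 1) ≠ 0 := by positivity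
    have hdvd : (5 : Int) ∣ 5 ^ (k + 1) := ⟨5 ^ k, h5⟩
    have hm : PySem.Int.mod (5 ^ (k + 1)) 5 = 0 := (PySem.Int.mod_eq_zero_iff_dvd _ 5).mpr hdvd
    have hfd : PySem.Int.floordiv (5 ^ (k + 1) : Int) 5 = 5 ^ k := by
      rw [PySem.Int.floordiv_eq_ediv_of_pos (by norm_num), h5,
        Int.mul_ediv_cancel_left _ (by norm_num)]
    rw [if_neg h1, if_neg (by simp), dif_neg h0, hfd, ih]
    have : ((k : Int)) ≠ -1 := by omega
    rw [if_neg this]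
    omega

-- A on anything that is not a positive exact power: -1
theorem degree5_not_pow (n : Int) (h0 : n ≠ 0) (hnp : ∀ k : ℕ, n ≠ 5 ^ k) :
    degree5 n = -1 := by
  rw [degree5]
  have h1 : n ≠ 1 := by have := hnp 0; simpa using this
  rw [if_neg h1]
  by_cases hm : PySem.Int.mod n 5 ≠ 0
  · rw [if_pos hm]
  rw [if_neg hm, dif_neg h0]
  push_neg at hm
  obtain ⟨m, hmk⟩ := (PySem.Int.mod_eq_zero_iff_dvd n 5).mp hm
  have hfd : PySem.Int.floordiv n 5 = m := by
    rw [PySem.Int.floordiv_eq_ediv_of_pos (by norm_num), hmk,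
      Int.mul_ediv_cancel_left _ (by norm_num)]
  have hm0 : m ≠ 0 := by rintro rfl; simp at hmk; omega
  have hmnp : ∀ k : ℕ, m ≠ 5 ^ k := by
    intro k hk
    exact hnp (k + 1) (by rw [hmk, hk]; ring)
  have := degree5_not_pow m hm0 hmnp
  rw [hfd, this, if_pos rfl]
termination_by n.natAbs
decreasing_by
  have hlt := pvDec5 n (not_ne_iff.mp hm) h0
  rw [hfd] at hlt
  exact hlt

-- B on an exact multiple: degree5Up (p * 5^k) p c = c + k
theorem degree5Up_pow (k : ℕ) (p c : Int) (hp : 1 ≤ p) :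
    degree5Up (p * 5 ^ k) p c hp = c + k := by
  induction k generalizing p c with
  | zero =>
    rw [degree5Up]
    simp
  | succ k ih =>
    rw [degree5Up]
    have hlt : p < p * 5 ^ (k + 1) := by
      have : (1 : Int) < 5 ^ (k + 1) := by
        have : (5 : Int) ^ (k + 1) ≥ 5 ^ 1 := by
          apply pow_le_pow_right₀ (by norm_num); omega
        simpa using by linarith
      nlinarith
    rw [dif_pos hlt]
    have heq : p * 5 ^ (k + 1) = (p * 5) * 5 ^ k := by ring
    rw [heq, ih (p * 5) (c + 1) (by linarith)]
    push_cast; ring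

-- B when n is not p times a power of 5: -1
theorem degree5Up_not_pow (n p c : Int) (hp : 1 ≤ p)
    (hnp : ∀ k : ℕ, n ≠ p * 5 ^ k) : degree5Up n p c hp = -1 := by
  rw [degree5Up]
  by_cases h : p < n
  · rw [dif_pos h]
    exact degree5Up_not_pow n (p * 5) (c + 1) (by linarith)
      (fun k hk => hnp (k + 1) (by rw [hk]; ring))
  · rw [dif_neg h]
    have hne : p ≠ n := fun he => hnp 0 (by simp [← he])
    rw [if_neg hne]
termination_by (n - p).toNat
decreasing_by omega

-- ===== VERDICT (by name: the statement is the Claim_ definition above) =====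
theorem degree5_spec : Claim_equal_degree5 := by
  intro n _ hne
  unfold Spec_degree5 degree5_alt
  by_cases hpow : ∃ k : ℕ, n = 5 ^ k
  · obtain ⟨k, rfl⟩ := hpow
    rw [degree5_pow]
    have := degree5Up_pow k 1 0 (by norm_num)
    simpa using this.symm
  · push_neg at hpow
    rw [degree5_not_pow n hne hpow, degree5Up_not_pow n 1 0 (by norm_num)
      (fun k => by simpa using hpow k)]
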